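-- pv_equiv track=rewrite | github.com/adrianvigan/kb-assist | dashboard/pages/3_➕_Pending_New_TS.py | parse_perts
-- ===== SOURCE A (Python) =====
-- def parse_perts(perts_text):
--     """Parse PERTS text into structured categories"""
--     if not perts_text:
--         return {}
--
--     categories = {}
--     current_category = None
--     current_content = []
--
--     for line in perts_text.split('\n'):
--         line = line.strip()
--
--         # Check if this is a category header (all caps followed by content or newline)
--         if line and line.isupper() and '_' in line:
--             # Save previous category
--             if current_category:
--                 categories[current_category] = '\n'.join(current_content).strip()
--
--             # Start new category
--             current_category = line
--             current_content = []
--         elif current_category: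
--             # Add to current category content
--             if line:
--                 current_content.append(line)
--
--     # Save last category
--     if current_category:
--         categories[current_category] = '\n'.join(current_content).strip()
--
--     return categories
-- ===== SOURCE B (Python) =====
-- def _is_header(line):
--     return bool(line) and line.isupper() and '_' in line
--
--
-- def parse_perts(perts_text):
--     """Parse PERTS text into structured categories (two-phase: locate headers, then fill segments)."""
--     if not perts_text:
--         return {}
--     lines = [l.strip() for l in perts_text.split('\n')]
--     n = len(lines)
--     # phase 1: skip everything before the first header
--     i = 0
--     while i < n and not _is_header(lines[i]):
--         i += 1
--     # phase 2: for each header, collect the segment up to the next header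
--     categories = {}
--     while i < n:
--         j = i + 1
--         while j < n and not _is_header(lines[j]):
--             j += 1
--         body = [l for l in lines[i + 1:j] if l]
--         categories[lines[i]] = '\n'.join(body).strip()
--         i = j
--     return categories
-- ===== Notes on version B (the rewrite author's own statement) =====
-- stated objective: alternative
-- what changed: Replaces A's stateful single sweep (current_category/current_content accumulator flushed on each new header and at the end) with a two-phase decomposition: strip all lines up front, skip the prefix before the first header, then for each header collect the segment up to the next header and assign it directly.
import Mathlib
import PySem

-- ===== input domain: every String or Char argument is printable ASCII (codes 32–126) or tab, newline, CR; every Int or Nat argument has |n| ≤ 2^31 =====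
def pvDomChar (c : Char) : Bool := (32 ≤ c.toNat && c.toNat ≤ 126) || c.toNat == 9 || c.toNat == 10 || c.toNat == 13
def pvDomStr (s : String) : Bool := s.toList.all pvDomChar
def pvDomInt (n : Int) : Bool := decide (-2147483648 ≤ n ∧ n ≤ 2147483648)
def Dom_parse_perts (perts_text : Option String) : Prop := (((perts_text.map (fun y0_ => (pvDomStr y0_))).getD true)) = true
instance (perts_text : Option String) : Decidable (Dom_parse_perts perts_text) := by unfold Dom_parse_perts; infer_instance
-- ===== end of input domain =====

-- B replaces A's stateful single-sweep accumulator by a two-phase decomposition (strip all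
-- lines, skip the prefix before the first header, then fill one segment per header);
-- objective: alternative decomposition, not speed.

-- shared primitive: Python str.isupper() — at least one cased character and no lowercase one;
-- exact on the ASCII domain (cased characters there are exactly a-z / A-Z)
def pvStrIsupper (s : String) : Bool :=
  s.toList.any (fun c => PySem.Chars.islower c || PySem.Chars.isupper c) &&
  s.toList.all (fun c => !PySem.Chars.islower c)

-- ===== PORT A =====
-- one loop step of A's for-loop; state = (categories, current_category, current_content)
def pvStepA (st : PySem.Dict String String × Option String × List String) (line0 : String) :
    PySem.Dict String String × Option String × List String :=
  let line := PySem.Str.strip line0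
  if line != "" && pvStrIsupper line && PySem.Str.isIn "_" line then
    (match st.2.1 with
     | some c => st.1.insert c (PySem.Str.strip (PySem.Str.join "\n" st.2.2))
     | none => st.1,
     some line, [])
  else
    match st.2.1 with
    | some _ => if line != "" then (st.1, st.2.1, st.2.2 ++ [line]) else st
    | none => st

def parse_perts (perts_text : Option String) : List (String × String) :=
  match perts_text with
  | none => []
  | some s =>
    if s == "" then []
    else
      -- s.split('\n'): sep "\n" is non-empty, so split? is always some (getD never fires)
      let lines := (PySem.Str.split? s "\n").getD []
      let fin := lines.foldl pvStepA (PySem.Dict.empty, none, [])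
      (match fin.2.1 with
       | some c => fin.1.insert c (PySem.Str.strip (PySem.Str.join "\n" fin.2.2))
       | none => fin.1).items

-- ===== PORT B =====
def pvIsHeader (line : String) : Bool :=
  line != "" && pvStrIsupper line && PySem.Str.isIn "_" line

-- '\n'.join(non-empty lines of the segment).strip()
def pvJoinBody (body : List String) : String :=
  PySem.Str.strip (PySem.Str.join "\n" (body.filter (fun l => l != "")))

-- phase 2 of B: one dict entry per header, body = lines up to the next header
def pvFill (d : PySem.Dict String String) : List String → PySem.Dict String String
  | [] => d
  | h :: rest =>
    pvFill (d.insert h (pvJoinBody (rest.takeWhile (fun l => !pvIsHeader l))))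
      (rest.dropWhile (fun l => !pvIsHeader l))
  termination_by ls => ls.length
  decreasing_by
    simpa using Nat.lt_succ_of_le (List.length_dropWhile_le _ _)

def parse_perts_alt (perts_text : Option String) : List (String × String) :=
  match perts_text with
  | none => []
  | some s =>
    if s == "" then []
    else
      -- s.split('\n'): sep "\n" is non-empty, so split? is always some (getD never fires)
      let lines := ((PySem.Str.split? s "\n").getD []).map PySem.Str.strip
      (pvFill PySem.Dict.empty (lines.dropWhile (fun l => !pvIsHeader l))).items

-- ===== PRECONDITION & SPEC =====
def Spec_parse_perts (perts_text : Option String) (out : List (String × String)) : Prop := out = parse_perts_alt perts_text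
instance (perts_text : Option String) (out : List (String × String)) : Decidable (Spec_parse_perts perts_text out) := by unfold Spec_parse_perts; infer_instance

-- ===== CLAIM (what is proved, stated in full; the proofs are below) =====
def Claim_equal_parse_perts : Prop := ∀ (perts_text : Option String), Dom_parse_perts perts_text → Spec_parse_perts perts_text (parse_perts perts_text)

-- ===== LEMMAS AND PROOFS =====

-- A's "save the current category" tail step
def pvSave (st : PySem.Dict String String × Option String × List String) : PySem.Dict String String :=
  match st.2.1 with
  | some c => st.1.insert c (PySem.Str.strip (PySem.Str.join "\n" st.2.2))
  | none => st.1

lemma pvL1 (ls : List String) : ∀ (d : PySem.Dict String String) (c : String) (acc : List String),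
    pvSave (ls.foldl pvStepA (d, some c, acc)) =
      pvFill (d.insert c (PySem.Str.strip (PySem.Str.join "\n"
          (acc ++ ((ls.map PySem.Str.strip).takeWhile (fun l => !pvIsHeader l)).filter (fun l => l != "")))))
        ((ls.map PySem.Str.strip).dropWhile (fun l => !pvIsHeader l)) := by
  induction ls with
  | nil => intro d c acc; simp [pvSave, pvFill]
  | cons l ls ih =>
    intro d c acc
    by_cases h : pvIsHeader (PySem.Str.strip l) = true
    · have h' : (PySem.Str.strip l != "" && pvStrIsupper (PySem.Str.strip l) && PySem.Str.isIn "_" (PySem.Str.strip l)) = true := h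
      simp only [List.foldl_cons, pvStepA, h', if_true]
      rw [ih]
      simp [pvFill, pvJoinBody, h]
    · have h' : (PySem.Str.strip l != "" && pvStrIsupper (PySem.Str.strip l) && PySem.Str.isIn "_" (PySem.Str.strip l)) = false := by
        simpa [pvIsHeader] using h
      simp only [List.foldl_cons, pvStepA, h', Bool.false_eq_true, if_false]
      by_cases hl : (PySem.Str.strip l != "") = true
      · simp only [hl, if_true]
        rw [ih]
        simp [h, hl]
      · simp only [hl, Bool.false_eq_true, if_false]
        rw [ih]
        have hl' : PySem.Str.strip l = "" := by
          simpa using hl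
        have h0 : pvIsHeader "" = false := rfl
        simp [hl', h0]

lemma pvL0 (ls : List String) : ∀ (d : PySem.Dict String String),
    pvSave (ls.foldl pvStepA (d, none, [])) =
      pvFill d ((ls.map PySem.Str.strip).dropWhile (fun l => !pvIsHeader l)) := by
  induction ls with
  | nil => intro d; simp [pvSave, pvFill]
  | cons l ls ih =>
    intro d
    by_cases h : pvIsHeader (PySem.Str.strip l) = true
    · have h' : (PySem.Str.strip l != "" && pvStrIsupper (PySem.Str.strip l) && PySem.Str.isIn "_" (PySem.Str.strip l)) = true := h
      simp only [List.foldl_cons, pvStepA, h', if_true]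
      rw [pvL1]
      simp [pvFill, pvJoinBody, h]
    · have h' : (PySem.Str.strip l != "" && pvStrIsupper (PySem.Str.strip l) && PySem.Str.isIn "_" (PySem.Str.strip l)) = false := by
        simpa [pvIsHeader] using h
      simp only [List.foldl_cons, pvStepA, h', Bool.false_eq_true, if_false]
      rw [ih]
      simp [h]

-- ===== VERDICT (by name: the statement is the Claim_ definition above) =====
theorem parse_perts_spec : Claim_equal_parse_perts := by
  intro perts_text _
  unfold Spec_parse_perts parse_perts parse_perts_alt
  match perts_text with
  | none => rfl
  | some s =>
    by_cases hs : s == ""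
    · simp [hs]
    · simp only [hs, Bool.false_eq_true, if_false]
      change (pvSave _).items = _
      rw [pvL0]
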